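-- pv_equiv track=rewrite | github.com/Sebachowa/pi-trader | _archive/autonomous_components/backtesting.py | _generate_walk_forward_periods
-- ===== SOURCE A (Python) =====
-- from typing import Any, Dict, List, Optional, Set, Tuple, Union, Callable
--
-- def _generate_walk_forward_periods(data_length: int, train_size: int,
--                                   test_size: int) -> List[Tuple[int, int, int, int]]:
--     """Generate train/test period indices."""
--     periods = []
--     current_pos = 0
--
--     while current_pos + train_size + test_size <= data_length:
--         train_start = current_pos
--         train_end = current_pos + train_size
--         test_start = train_end
--         test_end = test_start + test_size
--
--         periods.append((train_start, train_end, test_start, test_end))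
--
--         # Move forward by test period
--         current_pos += test_size
--
--     return periods
-- ===== SOURCE B (Python) =====
-- from typing import List, Tuple
--
-- def _generate_walk_forward_periods(data_length: int, train_size: int,
--                                    test_size: int) -> List[Tuple[int, int, int, int]]:
--     """Generate train/test period indices (closed-form window count)."""
--     span = data_length - train_size - test_size
--     if test_size <= 0 or span < 0:
--         return []
--     n = span // test_size + 1
--     return [(i * test_size,
--              i * test_size + train_size,
--              i * test_size + train_size,
--              i * test_size + train_size + test_size)
--             for i in range(n)]
-- ===== Notes on version B (the rewrite author's own statement) =====
-- stated objective: simpler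
-- what changed: Replaces the condition-checked while loop that mutates current_pos with a closed-form window count n = (data_length - train_size - test_size) // test_size + 1 followed by an index-driven comprehension over range(n); Pre_ excludes non-positive test_size with a reachable first window, where A loops forever.
import Mathlib
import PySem

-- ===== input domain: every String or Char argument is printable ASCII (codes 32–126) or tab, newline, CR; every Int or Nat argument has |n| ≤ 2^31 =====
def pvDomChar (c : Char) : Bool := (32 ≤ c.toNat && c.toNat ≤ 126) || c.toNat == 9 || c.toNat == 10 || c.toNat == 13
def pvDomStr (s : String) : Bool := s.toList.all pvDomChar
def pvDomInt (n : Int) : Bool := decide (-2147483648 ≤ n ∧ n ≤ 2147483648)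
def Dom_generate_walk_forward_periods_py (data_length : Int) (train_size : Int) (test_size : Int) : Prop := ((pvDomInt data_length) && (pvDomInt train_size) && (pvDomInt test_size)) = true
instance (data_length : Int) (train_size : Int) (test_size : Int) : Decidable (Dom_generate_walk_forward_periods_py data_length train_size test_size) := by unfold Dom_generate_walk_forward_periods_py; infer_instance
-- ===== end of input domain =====

-- B replaces A's current_pos while loop with a closed-form window count and an index comprehension ('simpler').
-- Pre_ excludes non-positive test_size with a reachable first window, where Python A loops forever.


-- ===== PORT A =====
-- A's while loop; the Nat fuel only makes the recursion total (Pre_ guarantees it is never exhausted).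
def pvLoopA (data_length train_size test_size current_pos : Int) : Nat → List (Int × Int × Int × Int)
  | 0 => []
  | fuel + 1 =>
    if current_pos + train_size + test_size ≤ data_length then
      (current_pos, current_pos + train_size, current_pos + train_size,
        current_pos + train_size + test_size)
        :: pvLoopA data_length train_size test_size (current_pos + test_size) fuel
    else []

def generate_walk_forward_periods_py (data_length : Int) (train_size : Int) (test_size : Int) : List (Int × Int × Int × Int) :=
  pvLoopA data_length train_size test_size 0 ((data_length - train_size - test_size).toNat + 1)

-- ===== PORT B =====
def generate_walk_forward_periods_py_alt (data_length : Int) (train_size : Int) (test_size : Int) : List (Int × Int × Int × Int) :=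
  let span := data_length - train_size - test_size
  if test_size ≤ 0 ∨ span < 0 then []
  else
    let n := PySem.Int.floordiv span test_size + 1
    (List.range n.toNat).map (fun (i : Nat) =>
      ((i : Int) * test_size,
       (i : Int) * test_size + train_size,
       (i : Int) * test_size + train_size,
       (i : Int) * test_size + train_size + test_size))

-- ===== PRECONDITION & SPEC =====
-- Pre_ excludes exactly the inputs (test_size ≤ 0 with train_size + test_size ≤ data_length) on which
-- Python A's while loop never terminates (current_pos never advances past the bound).
def Pre_generate_walk_forward_periods_py (data_length : Int) (train_size : Int) (test_size : Int) : Prop :=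
  0 < test_size ∨ data_length < train_size + test_size
instance (data_length : Int) (train_size : Int) (test_size : Int) : Decidable (Pre_generate_walk_forward_periods_py data_length train_size test_size) := by unfold Pre_generate_walk_forward_periods_py; infer_instance

def pvWitness_generate_walk_forward_periods_py : Int × Int × Int := (10, 4, 2)

def Spec_generate_walk_forward_periods_py (data_length : Int) (train_size : Int) (test_size : Int) (out : List (Int × Int × Int × Int)) : Prop := out = generate_walk_forward_periods_py_alt data_length train_size test_size
instance (data_length : Int) (train_size : Int) (test_size : Int) (out : List (Int × Int × Int × Int)) : Decidable (Spec_generate_walk_forward_periods_py data_length train_size test_size out) := by unfold Spec_generate_walk_forward_periods_py; infer_instance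

-- ===== CLAIM (what is proved, stated in full; the proofs are below) =====
def Claim_equal_generate_walk_forward_periods_py : Prop := ∀ (data_length : Int) (train_size : Int) (test_size : Int), Dom_generate_walk_forward_periods_py data_length train_size test_size → Pre_generate_walk_forward_periods_py data_length train_size test_size → Spec_generate_walk_forward_periods_py data_length train_size test_size (generate_walk_forward_periods_py data_length train_size test_size)

-- ===== LEMMAS AND PROOFS =====

-- Loop characterisation: with positive step and enough fuel, A's loop from position c
-- produces exactly the closed-form windows counted by floor division.
theorem pvLoopA_closed (dl tr te : Int) (hte : 0 < te) :
    ∀ (fuel : Nat) (c : Int), dl - tr - te - c < (fuel : Int) * te →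
      pvLoopA dl tr te c fuel =
        (List.range ((PySem.Int.floordiv (dl - tr - te - c) te + 1).toNat)).map (fun (i : Nat) =>
          (c + (i : Int) * te, c + (i : Int) * te + tr, c + (i : Int) * te + tr,
           c + (i : Int) * te + tr + te)) := by
  intro fuel
  induction fuel with
  | zero =>
    intro c h
    have hs : dl - tr - te - c < 0 := by simpa using h
    have hfd : PySem.Int.floordiv (dl - tr - te - c) te < 0 := by
      rw [PySem.Int.floordiv_lt_iff_lt_mul hte]; omega
    have : (PySem.Int.floordiv (dl - tr - te - c) te + 1).toNat = 0 := by omega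
    simp [pvLoopA, this]
  | succ fuel ih =>
    intro c h
    by_cases hc : c + tr + te ≤ dl
    · have hs : 0 ≤ dl - tr - te - c := by omega
      have hnext : dl - tr - te - (c + te) < (fuel : Int) * te := by
        push_cast at h
        nlinarith [h]
      have hrec := ih (c + te) hnext
      have hfd : PySem.Int.floordiv (dl - tr - te - c) te =
          PySem.Int.floordiv (dl - tr - te - (c + te)) te + 1 := by
        rw [PySem.Int.floordiv_eq_ediv_of_pos hte, PySem.Int.floordiv_eq_ediv_of_pos hte]
        have : dl - tr - te - c = (dl - tr - te - (c + te)) + 1 * te := by ring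
        rw [this, Int.add_mul_ediv_right _ _ (by omega : te ≠ 0)]
      have hfd0 : 0 ≤ PySem.Int.floordiv (dl - tr - te - (c + te)) te + 1 := by
        have h1 : PySem.Int.floordiv (dl - tr - te - c) te ≥ 0 := by
          rw [ge_iff_le, PySem.Int.le_floordiv_iff_mul_le hte]; omega
        omega
      have htn : (PySem.Int.floordiv (dl - tr - te - c) te + 1).toNat =
          (PySem.Int.floordiv (dl - tr - te - (c + te)) te + 1).toNat + 1 := by
        rw [hfd]; omega
      simp only [pvLoopA, if_pos hc, hrec, htn, List.range_succ_eq_map, List.map_cons,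
        List.map_map]
      refine List.cons_eq_cons.mpr ⟨?_, ?_⟩
      · simp only [Prod.mk.injEq]
        refine ⟨by ring, by ring, by ring, by ring⟩
      · apply List.map_congr_left
        intro i _
        simp only [Function.comp_apply, Prod.mk.injEq]
        push_cast
        refine ⟨by ring, by ring, by ring, by ring⟩
    · have hs : dl - tr - te - c < 0 := by omega
      have hfd : PySem.Int.floordiv (dl - tr - te - c) te < 0 := by
        rw [PySem.Int.floordiv_lt_iff_lt_mul hte]; omega
      have : (PySem.Int.floordiv (dl - tr - te - c) te + 1).toNat = 0 := by omega
      simp [pvLoopA, hc, this]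

-- ===== VERDICT (by name: the statement is the Claim_ definition above) =====
theorem generate_walk_forward_periods_py_spec : Claim_equal_generate_walk_forward_periods_py := by
  intro dl tr te _ hpre
  unfold Spec_generate_walk_forward_periods_py generate_walk_forward_periods_py
    generate_walk_forward_periods_py_alt
  by_cases hte : 0 < te
  · have hfuel : dl - tr - te - 0 < (((dl - tr - te).toNat + 1 : Nat) : Int) * te := by
      have h1 : (dl - tr - te : Int) ≤ ((dl - tr - te).toNat : Int) := Int.self_le_toNat _
      have h2 : (((dl - tr - te).toNat + 1 : Nat) : Int) = ((dl - tr - te).toNat : Int) + 1 := by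
        push_cast; ring
      nlinarith [Int.natCast_nonneg ((dl - tr - te).toNat), h1, hte]
    rw [pvLoopA_closed dl tr te hte _ 0 hfuel]
    by_cases hsp : dl - tr - te < 0
    · have hfd : PySem.Int.floordiv (dl - tr - te - 0) te < 0 := by
        rw [PySem.Int.floordiv_lt_iff_lt_mul hte]; omega
      have h0 : (PySem.Int.floordiv (dl - tr - te - 0) te + 1).toNat = 0 := by omega
      simp only [sub_zero] at h0
      simp [h0, hsp]
    · simp only [sub_zero]
      rw [if_neg (by omega)]
      apply List.map_congr_left
      intro i _
      simp
    -- done positive case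
  · -- te ≤ 0: Pre_ forces dl < tr + te, so A's loop stops immediately and B's span is negative
    have hlt : dl < tr + te := by
      rcases hpre with h | h
      · omega
      · exact h
    simp only [pvLoopA, if_neg (by omega : ¬ (0 + tr + te ≤ dl))]
    rw [if_pos (by omega)]
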